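-- pv_equiv track=rewrite | github.com/totgokhung123/SMS-Microservices-Banking | data/raw/csv/trích xuất nhãn/processing_mapping_label/v2/v3/v3_placeholder_labels.py | category_guess
-- ===== SOURCE A (Python) =====
-- def category_guess(tok: set) -> str:
--     # heuristic by presence of tokens
--     tests = [
--         ("card", "card"),
--         ("account", "account"),
--         ("loan", "loans"),
--         ("installment", "loans"),
--         ("wire", "payments"),
--         ("transfer", "payments"),
--         ("bill", "payments"),
--         ("autopay", "payments"),
--         ("dispute", "disputes"),
--         ("chargeback", "disputes"),
--         ("fraud", "security"),
--         ("phishing", "security"),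
--         ("password", "security"),
--         ("pin", "security"),
--         ("otp", "security"),
--         ("fee", "fees"),
--         ("interest", "fees"),
--         ("annualfee", "fees"),
--         ("promo", "rewards"),
--         ("rewards", "rewards"),
--         ("cashback", "rewards"),
--         ("appstore", "apps"),
--         ("playstore", "apps"),
--         ("issuer", "issuer"),
--         ("branch", "contact"),
--         ("atm", "contact"),
--         ("support", "contact"),
--         ("service", "contact"),
--         ("customer", "contact"),
--     ]
--     for k, cat in tests:
--         if k in tok:
--             return cat
--     return "other"
-- ===== SOURCE B (Python) =====
-- # Categories grouped with their trigger tokens, in A's priority order.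
-- # (In A's flat list, all tokens of one category are contiguous, so group
-- # order alone determines priority between categories; within a group the
-- # category is the same, so ties are harmless.)
-- GROUPS = [
--     ("card", ["card"]),
--     ("account", ["account"]),
--     ("loans", ["loan", "installment"]),
--     ("payments", ["wire", "transfer", "bill", "autopay"]),
--     ("disputes", ["dispute", "chargeback"]),
--     ("security", ["fraud", "phishing", "password", "pin", "otp"]),
--     ("fees", ["fee", "interest", "annualfee"]),
--     ("rewards", ["promo", "rewards", "cashback"]),
--     ("apps", ["appstore", "playstore"]),
--     ("issuer", ["issuer"]),
--     ("contact", ["branch", "atm", "support", "service", "customer"]),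
-- ]
--
--
-- def _rank(t):
--     # priority rank of token t = index of its category group, or None
--     for i, (cat, ks) in enumerate(GROUPS):
--         if t in ks:
--             return (i, cat)
--     return None
--
--
-- def category_guess(tok: set) -> str:
--     # argmin over the input set: keep the token with the smallest group rank
--     best = None
--     for t in tok:
--         e = _rank(t)
--         if e is not None and (best is None or e[0] < best[0]):
--             best = e
--     return best[1] if best is not None else "other"
-- ===== Notes on version B (the rewrite author's own statement) =====
-- stated objective: alternative
-- what changed: Replaces A's first-match scan of a flat priority list against the set with a grouped category->tokens table plus a rank function, taking the argmin rank over the input set (correct because tokens of one category are contiguous in A's list).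
import Mathlib
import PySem

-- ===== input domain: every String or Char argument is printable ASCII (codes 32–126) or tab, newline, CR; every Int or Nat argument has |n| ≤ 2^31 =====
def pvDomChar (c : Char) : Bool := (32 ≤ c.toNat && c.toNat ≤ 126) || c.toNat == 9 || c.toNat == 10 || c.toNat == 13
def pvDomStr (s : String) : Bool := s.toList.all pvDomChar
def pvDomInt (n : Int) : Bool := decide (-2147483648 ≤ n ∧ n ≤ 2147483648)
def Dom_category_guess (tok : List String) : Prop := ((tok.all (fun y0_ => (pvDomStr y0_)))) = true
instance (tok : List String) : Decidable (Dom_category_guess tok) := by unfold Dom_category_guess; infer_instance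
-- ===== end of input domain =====

-- B replaces A's first-match scan of the flat priority list with a grouped
-- category table, a rank function and an argmin over the input; return values
-- are proved equal.

-- ===== PORT A =====
def testsA : List (String × String) := [
  ("card", "card"), ("account", "account"), ("loan", "loans"),
  ("installment", "loans"), ("wire", "payments"), ("transfer", "payments"),
  ("bill", "payments"), ("autopay", "payments"), ("dispute", "disputes"),
  ("chargeback", "disputes"), ("fraud", "security"), ("phishing", "security"),
  ("password", "security"), ("pin", "security"), ("otp", "security"),
  ("fee", "fees"), ("interest", "fees"), ("annualfee", "fees"),
  ("promo", "rewards"), ("rewards", "rewards"), ("cashback", "rewards"),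
  ("appstore", "apps"), ("playstore", "apps"), ("issuer", "issuer"),
  ("branch", "contact"), ("atm", "contact"), ("support", "contact"),
  ("service", "contact"), ("customer", "contact")]

-- A's loop: return the category of the first test whose key is in tok, else "other"
def goA : List (String × String) → List String → String
  | [], _ => "other"
  | (k, c) :: rest, tok => if tok.contains k then c else goA rest tok

def category_guess (tok : List String) : String := goA testsA tok

-- ===== PORT B =====
-- GROUPS: each category once, with its trigger tokens
def groupsB : List (String × List String) := [
  ("card", ["card"]),
  ("account", ["account"]),
  ("loans", ["loan", "installment"]),
  ("payments", ["wire", "transfer", "bill", "autopay"]),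
  ("disputes", ["dispute", "chargeback"]),
  ("security", ["fraud", "phishing", "password", "pin", "otp"]),
  ("fees", ["fee", "interest", "annualfee"]),
  ("rewards", ["promo", "rewards", "cashback"]),
  ("apps", ["appstore", "playstore"]),
  ("issuer", ["issuer"]),
  ("contact", ["branch", "atm", "support", "service", "customer"])]

-- _rank(t): scan the groups with a running index, return (i, cat) or None
def rnk : List (String × List String) → Int → String → Option (Int × String)
  | [], _, _ => none
  | (c, ks) :: rest, i, t => if ks.contains t then some (i, c) else rnk rest (i + 1) t

-- loop body: e = _rank(t); if e is not None and (best is None or e[0] < best[0]): best = e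
def stepB (best : Option (Int × String)) (t : String) : Option (Int × String) :=
  match rnk groupsB 0 t with
  | none => best
  | some e =>
    match best with
    | none => some e
    | some b => if e.1 < b.1 then some e else best

def category_guess_alt (tok : List String) : String :=
  match tok.foldl stepB none with
  | some b => b.2
  | none => "other"

-- ===== PRECONDITION & SPEC =====
def Spec_category_guess (tok : List String) (out : String) : Prop := out = category_guess_alt tok
instance (tok : List String) (out : String) : Decidable (Spec_category_guess tok out) := by unfold Spec_category_guess; infer_instance

-- ===== CLAIM (what is proved, stated in full; the proofs are below) =====
def Claim_equal_category_guess : Prop := ∀ (tok : List String), Dom_category_guess tok → Spec_category_guess tok (category_guess tok)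

-- ===== LEMMAS AND PROOFS =====

-- proof-only view of stepB's combining logic
def comb (best : Option (Int × String)) (o : Option (Int × String)) : Option (Int × String) :=
  match o with
  | none => best
  | some e =>
    match best with
    | none => some e
    | some b => if e.1 < b.1 then some e else some b

def interp : Option (Int × String) → String
  | some b => b.2
  | none => "other"

-- A's flat test list is the flattening of B's grouped table
def flat : List (String × List String) → List (String × String)
  | [] => []
  | (c, ks) :: rest => ks.map (fun k => (k, c)) ++ flat rest

theorem testsA_eq_flat : testsA = flat groupsB := by decide

theorem stepB_eq : stepB = fun b t => comb b (rnk groupsB 0 t) := by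
  funext b t
  simp only [stepB, comb]
  cases rnk groupsB 0 t with
  | none => rfl
  | some e => cases b with | none => rfl | some bb => rfl

theorem rnk_lb : ∀ (gs : List (String × List String)) (n : Int) (t : String) (e : Int × String),
    rnk gs n t = some e → n ≤ e.1 := by
  intro gs
  induction gs with
  | nil => intro n t e h; simp [rnk] at h
  | cons p rest ih =>
    intro n t e h
    obtain ⟨c, ks⟩ := p
    by_cases hk : t ∈ ks
    · have h' : some (n, c) = some e := by simpa [rnk, hk] using h
      obtain rfl := Option.some.inj h'
      exact le_refl n
    · simp [rnk, hk] at h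
      have := ih (n + 1) t e h
      omega

-- A's first-match over the head group: c if any group token is in tok
theorem goA_group (c : String) (ks : List String) (rest : List (String × String))
    (tok : List String) :
    goA (ks.map (fun k => (k, c)) ++ rest) tok
      = if ks.any tok.contains then c else goA rest tok := by
  induction ks with
  | nil => simp
  | cons k ks ih =>
    by_cases h : k ∈ tok
    · simp [goA, h]
    · simp [goA, h, ih]

-- fold over tok with comb keeps / reaches the unique minimum e0
theorem fold_min (g : String → Option (Int × String)) (e0 : Int × String) :
    ∀ (tok : List String),
    (∀ t ∈ tok, ∀ e, g t = some e → e0.1 ≤ e.1 ∧ (e.1 = e0.1 → e = e0)) →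
    ∀ best : Option (Int × String),
    (best = some e0 ∨ ((∃ t ∈ tok, g t = some e0) ∧
      (best = none ∨ ∃ b, best = some b ∧ e0.1 < b.1))) →
    tok.foldl (fun b t => comb b (g t)) best = some e0 := by
  intro tok
  induction tok with
  | nil =>
    intro _ best hb
    rcases hb with h | ⟨⟨t, ht, _⟩, _⟩
    · simpa using h
    · simp at ht
  | cons t rest ih =>
    intro hmin best hb
    simp only [List.foldl_cons]
    have hmin' : ∀ u ∈ rest, ∀ e, g u = some e → e0.1 ≤ e.1 ∧ (e.1 = e0.1 → e = e0) := by
      intro u hu; exact hmin u (List.mem_cons_of_mem _ hu)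
    rcases hb with hb | ⟨⟨t0, ht0, hg0⟩, hbest⟩
    · -- best is already the minimum; comb keeps it
      subst hb
      cases hgt : g t with
      | none => exact ih hmin' _ (Or.inl (by simp [comb]))
      | some e =>
        have hle := (hmin t (List.mem_cons_self) e hgt).1
        apply ih hmin'
        left
        simp [comb]
        omega
    · -- minimum still ahead (or reached right now)
      cases hgt : g t with
      | none =>
        have ht0' : t0 ∈ rest := by
          rcases List.mem_cons.mp ht0 with rfl | h
          · rw [hgt] at hg0; exact absurd hg0 (by simp)
          · exact h
        exact ih hmin' _ (Or.inr ⟨⟨t0, ht0', hg0⟩, by simpa [comb, hgt] using hbest⟩)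
      | some e =>
        have he := hmin t (List.mem_cons_self) e hgt
        by_cases heq : e = e0
        · subst heq
          apply ih hmin'
          left
          rcases hbest with rfl | ⟨b, rfl, hlt⟩
          · simp [comb]
          · simp [comb, hlt]
        · have hlt0 : e0.1 < e.1 := by
            rcases lt_or_eq_of_le he.1 with h | h
            · exact h
            · exact absurd (he.2 h.symm) heq
          have ht0' : t0 ∈ rest := by
            rcases List.mem_cons.mp ht0 with rfl | h
            · rw [hgt] at hg0
              exact absurd (Option.some.inj hg0) heq
            · exact h
          apply ih hmin'
          right
          refine ⟨⟨t0, ht0', hg0⟩, ?_⟩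
          right
          rcases hbest with rfl | ⟨b, rfl, hlt⟩
          · exact ⟨e, by simp [comb], hlt0⟩
          · by_cases hc : e.1 < b.1
            · exact ⟨e, by simp [comb, hc], hlt0⟩
            · exact ⟨b, by simp [comb, hc], hlt⟩

-- when no element of tok hits the lookup, the fold keeps best
theorem fold_none (g : String → Option (Int × String))
    (tok : List String) (hg : ∀ t ∈ tok, g t = none) (best : Option (Int × String)) :
    tok.foldl (fun b t => comb b (g t)) best = best := by
  induction tok generalizing best with
  | nil => rfl
  | cons t rest ih =>
    simp only [List.foldl_cons]
    rw [hg t (List.mem_cons_self)]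
    exact ih (fun u hu => hg u (List.mem_cons_of_mem _ hu)) best

-- the heart: A's first-match over the flattened groups = interp of B's argmin fold
theorem main_lemma : ∀ (gs : List (String × List String)) (n : Int) (tok : List String),
    goA (flat gs) tok = interp (tok.foldl (fun b t => comb b (rnk gs n t)) none) := by
  intro gs
  induction gs with
  | nil =>
    intro n tok
    rw [fold_none (fun t => rnk [] n t) tok (fun t _ => rfl) none]
    rfl
  | cons p rest ih =>
    intro n tok
    obtain ⟨c, ks⟩ := p
    show goA (ks.map (fun k => (k, c)) ++ flat rest) tok = _
    rw [goA_group]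
    by_cases hny : ks.any tok.contains
    · -- some token of the head group is present: the fold's minimum is (n, c)
      obtain ⟨k, hkks, hktok⟩ := List.any_eq_true.mp hny
      have hfold : tok.foldl (fun b t => comb b (rnk ((c, ks) :: rest) n t)) none
          = some (n, c) := by
        apply fold_min _ (n, c) tok
        · intro t _ e he
          by_cases hkt : t ∈ ks
          · have h' : some ((n : Int), c) = some e := by simpa [rnk, hkt] using he
            obtain rfl := Option.some.inj h'
            exact ⟨le_refl _, fun _ => rfl⟩
          · simp [rnk, hkt] at he
            have := rnk_lb rest (n + 1) t e he
            refine ⟨by omega, fun h => absurd h (by omega)⟩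
        · refine Or.inr ⟨⟨k, by simpa using hktok, ?_⟩, Or.inl rfl⟩
          simp [rnk, hkks]
      rw [hfold, if_pos hny]
      rfl
    · -- head group invisible: shift the offset and recurse
      have hcongr : tok.foldl (fun b t => comb b (rnk ((c, ks) :: rest) n t)) none
          = tok.foldl (fun b t => comb b (rnk rest (n + 1) t)) none := by
        apply PySem.List.foldl_congr_mem
        intro b t ht
        have hkt : t ∉ ks := by
          intro ht'
          exact hny (List.any_eq_true.mpr ⟨t, ht', by simpa using ht⟩)
        simp [rnk, hkt]
      rw [if_neg hny, hcongr]
      exact ih (n + 1) tok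

-- ===== VERDICT (by name: the statement is the Claim_ definition above) =====
theorem category_guess_spec : Claim_equal_category_guess := by
  intro tok _
  unfold Spec_category_guess category_guess category_guess_alt
  rw [stepB_eq, testsA_eq_flat, main_lemma groupsB 0 tok]
  cases tok.foldl (fun b t => comb b (rnk groupsB 0 t)) none <;> rfl
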